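-- pv_equiv track=rewrite | github.com/TeeKay-FourTwentyOne/math | ramsey-book-graphs/analyze_composite_deep.py | full_validation
-- ===== SOURCE A (Python) =====
-- def Delta(A, B, d, m):
--     B_set = set(B)
--     return sum(1 for a in A if (a - d) % m in B_set)
--
-- def Sigma(A, B, d, m):
--     B_set = set(B)
--     return sum(1 for a in A if (d - a) % m in B_set)
--
-- def full_validation(D11, D12, D22, m, n):
--     """Full validation with detailed violation reporting."""
--     D11_set = set(D11)
--     D12_set = set(D12)
--     D22_set = set(D22)
--     D12T = {(-x) % m for x in D12}
--
--     N = 2 * m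
--     d1 = len(D11) + len(D12)
--     d2 = len(D22) + len(D12)
--
--     red_threshold = n - 2
--     blue_threshold = n - 1
--
--     violations = []
--
--     # V1V1
--     for d in range(1, m):
--         common_red = Delta(D11_set, D11_set, d, m) + Delta(D12_set, D12_set, d, m)
--         if d in D11_set:
--             if common_red > red_threshold:
--                 violations.append(('V1V1_red', d, common_red, red_threshold))
--         else:
--             common_blue = (N - 2) - d1 - d1 + common_red
--             if common_blue > blue_threshold:
--                 violations.append(('V1V1_blue', d, common_blue, blue_threshold))
--
--     # V2V2
--     for d in range(1, m):
--         common_red = Delta(D22_set, D22_set, d, m) + Delta(D12T, D12T, d, m)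
--         if d in D22_set:
--             if common_red > red_threshold:
--                 violations.append(('V2V2_red', d, common_red, red_threshold))
--         else:
--             common_blue = (N - 2) - d2 - d2 + common_red
--             if common_blue > blue_threshold:
--                 violations.append(('V2V2_blue', d, common_blue, blue_threshold))
--
--     # V1V2
--     for d in range(m):
--         common_red = Sigma(D11_set, D12_set, d, m) + Delta(D12_set, D22_set, d, m)
--         if d in D12_set:
--             if common_red > red_threshold:
--                 violations.append(('V1V2_red', d, common_red, red_threshold))
--         else:
--             common_blue = (N - 2) - d1 - d2 + common_red
--             if common_blue > blue_threshold:
--                 violations.append(('V1V2_blue', d, common_blue, blue_threshold))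
--
--     return violations
-- ===== SOURCE B (Python) =====
-- def _corr(A, B, m, add):
--     """Cyclic correlation counts, bucketed by residue class: cnt[k] = #{(a,b) in
--     A x B : 0 <= b < m and (a+b)%m == k (add) resp. (a-b)%m == k (not add)}.
--     Shifts only exist for m > 0."""
--     cnt = {}
--     if m <= 0:
--         return cnt
--     res = {}
--     for a in A:
--         r = a % m
--         res[r] = res.get(r, 0) + 1
--     Bm = [b for b in B if 0 <= b < m]
--     for r, c in res.items():
--         for b in Bm:
--             k = (r + b) % m if add else (r - b) % m
--             cnt[k] = cnt.get(k, 0) + c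
--     return cnt
--
--
-- def _judge(red_tag, blue_tag, d, counters, members, deg_sum, m, n):
--     cr = sum(c.get(d, 0) for c in counters)
--     if d in members:
--         if cr > n - 2:
--             return (red_tag, d, cr, n - 2)
--     else:
--         cb = (2 * m - 2) - deg_sum + cr
--         if cb > n - 1:
--             return (blue_tag, d, cb, n - 1)
--     return None
--
--
-- def full_validation(D11, D12, D22, m, n):
--     """Full validation; all correlation shifts precomputed in one pair sweep."""
--     D11s = set(D11)
--     D12s = set(D12)
--     D22s = set(D22)
--     D12T = {(-x) % m for x in D12}
--
--     d1 = len(D11) + len(D12)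
--     d2 = len(D22) + len(D12)
--
--     c11 = _corr(D11s, D11s, m, False)
--     c12 = _corr(D12s, D12s, m, False)
--     c22 = _corr(D22s, D22s, m, False)
--     cTT = _corr(D12T, D12T, m, False)
--     s112 = _corr(D11s, D12s, m, True)
--     c1222 = _corr(D12s, D22s, m, False)
--
--     violations = []
--     for d in range(1, m):
--         v = _judge('V1V1_red', 'V1V1_blue', d, (c11, c12), D11s, d1 + d1, m, n)
--         if v is not None:
--             violations.append(v)
--     for d in range(1, m):
--         v = _judge('V2V2_red', 'V2V2_blue', d, (c22, cTT), D22s, d2 + d2, m, n)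
--         if v is not None:
--             violations.append(v)
--     for d in range(m):
--         v = _judge('V1V2_red', 'V1V2_blue', d, (s112, c1222), D12s, d1 + d2, m, n)
--         if v is not None:
--             violations.append(v)
--     return violations
-- ===== Notes on version B (the rewrite author's own statement) =====
-- stated objective: faster
-- what changed: Instead of rescanning the difference sets for every shift d (Delta/Sigma per d), B precomputes every cyclic correlation count once per set pair in a residue-bucketed pair sweep and answers each d by dictionary lookups.
import Mathlib
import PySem

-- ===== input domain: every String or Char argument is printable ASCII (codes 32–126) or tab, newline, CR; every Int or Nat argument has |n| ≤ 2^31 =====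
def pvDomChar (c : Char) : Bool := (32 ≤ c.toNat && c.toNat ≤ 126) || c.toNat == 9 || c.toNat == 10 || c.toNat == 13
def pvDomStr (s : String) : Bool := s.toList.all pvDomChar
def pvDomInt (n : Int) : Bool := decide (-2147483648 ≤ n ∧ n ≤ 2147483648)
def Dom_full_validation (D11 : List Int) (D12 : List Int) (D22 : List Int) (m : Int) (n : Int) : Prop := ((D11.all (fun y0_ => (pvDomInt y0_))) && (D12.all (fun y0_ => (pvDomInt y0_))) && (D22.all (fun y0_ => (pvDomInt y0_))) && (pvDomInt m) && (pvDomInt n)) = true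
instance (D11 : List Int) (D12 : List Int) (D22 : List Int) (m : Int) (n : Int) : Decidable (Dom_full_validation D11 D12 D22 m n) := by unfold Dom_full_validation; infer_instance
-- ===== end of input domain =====

-- B replaces A's per-shift rescans (Delta/Sigma for every d) by cyclic-correlation counters
-- built in one pair sweep per set pair, answering each d by a dictionary lookup (objective: faster).

-- ===== PORT A =====
def pyDelta (A B : List Int) (d m : Int) : Int :=
  let Bs : PySem.Set Int := PySem.Set.ofList B
  A.foldl (fun acc a => if Bs.contains (PySem.Int.mod (a - d) m) then acc + 1 else acc) 0

def pySigma (A B : List Int) (d m : Int) : Int :=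
  let Bs : PySem.Set Int := PySem.Set.ofList B
  A.foldl (fun acc a => if Bs.contains (PySem.Int.mod (d - a) m) then acc + 1 else acc) 0

def full_validation (D11 : List Int) (D12 : List Int) (D22 : List Int) (m : Int) (n : Int) : List (String × Int × Int × Int) :=
  let D11s : PySem.Set Int := PySem.Set.ofList D11
  let D12s : PySem.Set Int := PySem.Set.ofList D12
  let D22s : PySem.Set Int := PySem.Set.ofList D22
  let D12T : PySem.Set Int := PySem.Set.ofList (D12.map (fun x => PySem.Int.mod (-x) m))
  let N := 2 * m
  let d1 : Int := (D11.length : Int) + (D12.length : Int)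
  let d2 : Int := (D22.length : Int) + (D12.length : Int)
  let rt := n - 2
  let bt := n - 1
  let v1 := (PySem.List.pyRange 1 m 1).foldl (fun acc d =>
    let cr := pyDelta D11s D11s d m + pyDelta D12s D12s d m
    if PySem.Set.contains D11s d then
      (if cr > rt then acc ++ [("V1V1_red", d, cr, rt)] else acc)
    else
      let cb := (N - 2) - d1 - d1 + cr
      (if cb > bt then acc ++ [("V1V1_blue", d, cb, bt)] else acc)) []
  let v2 := (PySem.List.pyRange 1 m 1).foldl (fun acc d =>
    let cr := pyDelta D22s D22s d m + pyDelta D12T D12T d m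
    if PySem.Set.contains D22s d then
      (if cr > rt then acc ++ [("V2V2_red", d, cr, rt)] else acc)
    else
      let cb := (N - 2) - d2 - d2 + cr
      (if cb > bt then acc ++ [("V2V2_blue", d, cb, bt)] else acc)) v1
  (PySem.List.pyRange 0 m 1).foldl (fun acc d =>
    let cr := pySigma D11s D12s d m + pyDelta D12s D22s d m
    if PySem.Set.contains D12s d then
      (if cr > rt then acc ++ [("V1V2_red", d, cr, rt)] else acc)
    else
      let cb := (N - 2) - d1 - d2 + cr
      (if cb > bt then acc ++ [("V1V2_blue", d, cb, bt)] else acc)) v2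

-- ===== PORT B =====
-- correlation counts bucketed by residue class (res = counts per a % m; Bm = b in [0, m))
def bCorr (A B : List Int) (m : Int) (add : Bool) : PySem.Dict Int Int :=
  if m ≤ 0 then PySem.Dict.empty
  else
    let res := A.foldl (fun res a =>
      res.insert (PySem.Int.mod a m) (res.getD (PySem.Int.mod a m) 0 + 1)) PySem.Dict.empty
    let Bm := B.filter (fun b => decide (0 ≤ b ∧ b < m))
    res.items.foldl (fun cnt rc => Bm.foldl (fun cnt b =>
      let k := if add then PySem.Int.mod (rc.1 + b) m else PySem.Int.mod (rc.1 - b) m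
      cnt.insert k (cnt.getD k 0 + rc.2)) cnt) PySem.Dict.empty

-- cr = sum(c.get(d, 0) for c in counters) over the 2-tuple of counters, written out
def bJudge (redTag blueTag : String) (d : Int) (c1 c2 : PySem.Dict Int Int)
    (members : PySem.Set Int) (degSum m n : Int) : Option (String × Int × Int × Int) :=
  let cr := c1.getD d 0 + c2.getD d 0
  if PySem.Set.contains members d then
    (if cr > n - 2 then some (redTag, d, cr, n - 2) else none)
  else
    let cb := (2 * m - 2) - degSum + cr
    (if cb > n - 1 then some (blueTag, d, cb, n - 1) else none)

def full_validation_alt (D11 : List Int) (D12 : List Int) (D22 : List Int) (m : Int) (n : Int) : List (String × Int × Int × Int) :=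
  let D11s : PySem.Set Int := PySem.Set.ofList D11
  let D12s : PySem.Set Int := PySem.Set.ofList D12
  let D22s : PySem.Set Int := PySem.Set.ofList D22
  let D12T : PySem.Set Int := PySem.Set.ofList (D12.map (fun x => PySem.Int.mod (-x) m))
  let d1 : Int := (D11.length : Int) + (D12.length : Int)
  let d2 : Int := (D22.length : Int) + (D12.length : Int)
  let c11 := bCorr D11s D11s m false
  let c12 := bCorr D12s D12s m false
  let c22 := bCorr D22s D22s m false
  let cTT := bCorr D12T D12T m false
  let s112 := bCorr D11s D12s m true
  let c1222 := bCorr D12s D22s m false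
  let v1 := (PySem.List.pyRange 1 m 1).foldl (fun acc d =>
    match bJudge "V1V1_red" "V1V1_blue" d c11 c12 D11s (d1 + d1) m n with
    | some v => acc ++ [v]
    | none => acc) []
  let v2 := (PySem.List.pyRange 1 m 1).foldl (fun acc d =>
    match bJudge "V2V2_red" "V2V2_blue" d c22 cTT D22s (d2 + d2) m n with
    | some v => acc ++ [v]
    | none => acc) v1
  (PySem.List.pyRange 0 m 1).foldl (fun acc d =>
    match bJudge "V1V2_red" "V1V2_blue" d s112 c1222 D12s (d1 + d2) m n with
    | some v => acc ++ [v]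
    | none => acc) v2

-- ===== PRECONDITION & SPEC =====
-- Pre_ excludes exactly the inputs on which the Python A raises ZeroDivisionError
-- (m = 0 with D12 nonempty: the set comprehension {(-x) % m for x in D12} divides by zero).
def Pre_full_validation (D11 : List Int) (D12 : List Int) (D22 : List Int) (m : Int) (n : Int) : Prop :=
  m ≠ 0 ∨ D12 = []
instance (D11 : List Int) (D12 : List Int) (D22 : List Int) (m : Int) (n : Int) : Decidable (Pre_full_validation D11 D12 D22 m n) := by unfold Pre_full_validation; infer_instance

def pvWitness_full_validation : List Int × List Int × List Int × Int × Int := ([1, 2], [0, 3], [2], 7, 3)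

def Spec_full_validation (D11 : List Int) (D12 : List Int) (D22 : List Int) (m : Int) (n : Int) (out : List (String × Int × Int × Int)) : Prop := out = full_validation_alt D11 D12 D22 m n
instance (D11 : List Int) (D12 : List Int) (D22 : List Int) (m : Int) (n : Int) (out : List (String × Int × Int × Int)) : Decidable (Spec_full_validation D11 D12 D22 m n out) := by unfold Spec_full_validation; infer_instance

-- ===== CLAIM (what is proved, stated in full; the proofs are below) =====
def Claim_equal_full_validation : Prop := ∀ (D11 : List Int) (D12 : List Int) (D22 : List Int) (m : Int) (n : Int), Dom_full_validation D11 D12 D22 m n → Pre_full_validation D11 D12 D22 m n → Spec_full_validation D11 D12 D22 m n (full_validation D11 D12 D22 m n)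

-- ===== LEMMAS AND PROOFS =====

-- (a - b) % m = d  ↔  b = (a - d) % m, for b, d in [0, m)
theorem pv_mod_sub_iff (a b m d : Int) (hm : 0 < m) (hd0 : 0 ≤ d) (hdm : d < m)
    (hb0 : 0 ≤ b) (hbm : b < m) :
    (PySem.Int.mod (a - b) m = d ↔ b = PySem.Int.mod (a - d) m) := by
  rw [PySem.Int.mod_eq_emod_of_pos, PySem.Int.mod_eq_emod_of_pos] <;> try exact hm
  have hd : d % m = d := Int.emod_eq_of_lt hd0 hdm
  have hb : b % m = b := Int.emod_eq_of_lt hb0 hbm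
  constructor
  · intro h
    have h1 : (a - b) % m = d % m := by rw [hd]; exact h
    rw [Int.emod_eq_emod_iff_emod_sub_eq_zero] at h1
    have h2 : m ∣ (a - b - d) := Int.dvd_of_emod_eq_zero h1
    have h3 : (b - (a - d)) % m = 0 := Int.emod_eq_zero_of_dvd (by
      have := Int.dvd_neg.mpr h2; convert this using 1; ring)
    rw [← Int.emod_eq_emod_iff_emod_sub_eq_zero] at h3
    rw [hb] at h3; exact h3
  · intro h
    have h1 : b % m = (a - d) % m := by rw [hb]; exact h
    rw [Int.emod_eq_emod_iff_emod_sub_eq_zero] at h1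
    have h2 : m ∣ (b - (a - d)) := Int.dvd_of_emod_eq_zero h1
    have h3 : ((a - b) - d) % m = 0 := Int.emod_eq_zero_of_dvd (by
      have := Int.dvd_neg.mpr h2; convert this using 1; ring)
    rw [← Int.emod_eq_emod_iff_emod_sub_eq_zero] at h3
    rw [hd] at h3; exact h3

-- (a + b) % m = d  ↔  b = (d - a) % m, for b, d in [0, m)
theorem pv_mod_add_iff (a b m d : Int) (hm : 0 < m) (hd0 : 0 ≤ d) (hdm : d < m)
    (hb0 : 0 ≤ b) (hbm : b < m) :
    (PySem.Int.mod (a + b) m = d ↔ b = PySem.Int.mod (d - a) m) := by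
  rw [PySem.Int.mod_eq_emod_of_pos, PySem.Int.mod_eq_emod_of_pos] <;> try exact hm
  have hd : d % m = d := Int.emod_eq_of_lt hd0 hdm
  have hb : b % m = b := Int.emod_eq_of_lt hb0 hbm
  constructor
  · intro h
    have h1 : (a + b) % m = d % m := by rw [hd]; exact h
    rw [Int.emod_eq_emod_iff_emod_sub_eq_zero] at h1
    have h2 : m ∣ (a + b - d) := Int.dvd_of_emod_eq_zero h1
    have h3 : (b - (d - a)) % m = 0 := Int.emod_eq_zero_of_dvd (by
      convert h2 using 1; ring)
    rw [← Int.emod_eq_emod_iff_emod_sub_eq_zero] at h3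
    rw [hb] at h3; exact h3
  · intro h
    have h1 : b % m = (d - a) % m := by rw [hb]; exact h
    rw [Int.emod_eq_emod_iff_emod_sub_eq_zero] at h1
    have h2 : m ∣ (b - (d - a)) := Int.dvd_of_emod_eq_zero h1
    have h3 : ((a + b) - d) % m = 0 := Int.emod_eq_zero_of_dvd (by
      convert h2 using 1; ring)
    rw [← Int.emod_eq_emod_iff_emod_sub_eq_zero] at h3
    rw [hd] at h3; exact h3

-- one pass over a key list adding c at each key
theorem pv_add_many (K : List Int) (c v : Int) (cnt : PySem.Dict Int Int) :
    (K.foldl (fun cnt k => cnt.insert k (cnt.getD k 0 + c)) cnt).getD v 0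
      = cnt.getD v 0 + c * (K.count v : Int) := by
  induction K generalizing cnt with
  | nil => simp
  | cons k K ih =>
    rw [List.foldl_cons, ih]
    rw [PySem.Dict.getD_insert]
    by_cases h : v = k
    · subst h
      simp only [List.count_cons, BEq.rfl, if_pos]
      push_cast
      ring
    · have hbeq : (k == v) = false := by simp [Ne.symm h]
      simp only [h, if_false, List.count_cons, hbeq]
      push_cast
      ring

-- the residue-bucketed double sweep, as a sum over the residue/count pairs
theorem pv_pairs_fold (ps : List (Int × Int)) (g : Int → Int → Int) (Bm : List Int)
    (v : Int) (cnt : PySem.Dict Int Int) :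
    (ps.foldl (fun cnt rc => Bm.foldl (fun cnt b =>
        cnt.insert (g rc.1 b) (cnt.getD (g rc.1 b) 0 + rc.2)) cnt) cnt).getD v 0
      = cnt.getD v 0 + (ps.map (fun rc => rc.2 * ((Bm.map (g rc.1)).count v : Int))).sum := by
  induction ps generalizing cnt with
  | nil => simp
  | cons rc ps ih =>
    rw [List.foldl_cons, ih]
    have hstep : (Bm.foldl (fun cnt b =>
        cnt.insert (g rc.1 b) (cnt.getD (g rc.1 b) 0 + rc.2)) cnt).getD v 0
        = cnt.getD v 0 + rc.2 * ((Bm.map (g rc.1)).count v : Int) := by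
      have hk := pv_add_many (Bm.map (g rc.1)) rc.2 v cnt
      rw [List.foldl_map] at hk
      exact hk
    rw [hstep]
    simp only [List.map_cons, List.sum_cons]
    ring

-- residues collapse: (a % m ± b) % m = (a ± b) % m
theorem pv_mod_collapse_sub (a b m : Int) (hm : 0 < m) :
    PySem.Int.mod (PySem.Int.mod a m - b) m = PySem.Int.mod (a - b) m := by
  rw [PySem.Int.mod_eq_emod_of_pos, PySem.Int.mod_eq_emod_of_pos,
    PySem.Int.mod_eq_emod_of_pos] <;> try exact hm
  rw [Int.sub_emod, Int.emod_emod_of_dvd _ dvd_rfl, ← Int.sub_emod]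

theorem pv_mod_collapse_add (a b m : Int) (hm : 0 < m) :
    PySem.Int.mod (PySem.Int.mod a m + b) m = PySem.Int.mod (a + b) m := by
  rw [PySem.Int.mod_eq_emod_of_pos, PySem.Int.mod_eq_emod_of_pos,
    PySem.Int.mod_eq_emod_of_pos] <;> try exact hm
  rw [Int.add_emod, Int.emod_emod_of_dvd _ dvd_rfl, ← Int.add_emod]

-- grouping by residue: a weighted sum over the distinct residues is the plain sum
theorem pv_group_sum (xs : List Int) (F : Int → Int) :
    ((PySem.Set.ofList xs).map (fun k => (xs.count k : Int) * F k)).sum = (xs.map F).sum := by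
  have h1 : ((PySem.Set.ofList xs).map (fun k => (xs.count k : Int) * F k)).sum
      = ∑ x ∈ (PySem.Set.ofList xs : List Int).toFinset, (xs.count x : Int) * F x :=
    (List.sum_toFinset _ (PySem.Set.nodup_ofList xs)).symm
  have h2 : (PySem.Set.ofList xs : List Int).toFinset = xs.toFinset := by
    ext x
    simp [PySem.Set.mem_ofList]
  have h3 : (xs.map F).sum = ∑ x ∈ xs.toFinset, xs.count x • F x :=
    Finset.sum_list_map_count xs F
  rw [h1, h2, h3]
  apply Finset.sum_congr rfl
  intro x _
  rw [nsmul_eq_mul]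

-- the per-a count: on a duplicate-free B the correlation pass counts 0 or 1 per a,
-- exactly the membership indicator A's scan tests
theorem pv_count_indicator (B : List Int) (hB : B.Nodup) (m d : Int) (key : Int → Int) (c : Int)
    (hc0 : 0 ≤ c) (hcm : c < m)
    (hiff : ∀ b, 0 ≤ b → b < m → (key b = d ↔ b = c)) :
    (((B.filter (fun b => decide (0 ≤ b ∧ b < m))).map key).count d : Int)
      = (if c ∈ B then 1 else 0) := by
  have h1 : ((B.filter (fun b => decide (0 ≤ b ∧ b < m))).map key).count d
      = (B.filter (fun b => decide (0 ≤ b ∧ b < m))).countP (fun b => key b == d) := by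
    simp [List.count, List.countP_map]; rfl
  have h2 : (B.filter (fun b => decide (0 ≤ b ∧ b < m))).countP (fun b => key b == d)
      = (B.filter (fun b => decide (0 ≤ b ∧ b < m))).count c := by
    apply List.countP_congr
    intro b hb
    have hbmem := List.mem_filter.mp hb
    have hbnd : 0 ≤ b ∧ b < m := by simpa using hbmem.2
    have hbc := hiff b hbnd.1 hbnd.2
    simp only [beq_iff_eq]
    exact hbc
  rw [h1, h2]
  by_cases hmem : c ∈ B
  · have hcf : c ∈ B.filter (fun b => decide (0 ≤ b ∧ b < m)) := by
      apply List.mem_filter.mpr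
      exact ⟨hmem, by simp [hc0, hcm]⟩
    rw [List.count_eq_one_of_mem (List.Nodup.filter _ hB) hcf]
    simp [hmem]
  · have : c ∉ B.filter (fun b => decide (0 ≤ b ∧ b < m)) := by
      intro hx; exact hmem (List.mem_filter.mp hx).1
    rw [List.count_eq_zero.mpr this]
    simp [hmem]

-- the whole bCorr dictionary: lookup at v is the double correlation count
theorem pv_bCorr_getD (A B : List Int) (m : Int) (hm : 0 < m) (add : Bool) (v : Int) :
    (bCorr A B m add).getD v 0
      = (A.map (fun a =>
          (((B.filter (fun b => decide (0 ≤ b ∧ b < m))).map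
              (fun b => if add then PySem.Int.mod (a + b) m else PySem.Int.mod (a - b) m)).count v : Int))).sum := by
  unfold bCorr
  rw [if_neg (by omega)]
  have hres : A.foldl (fun res a =>
      res.insert (PySem.Int.mod a m) (res.getD (PySem.Int.mod a m) 0 + 1)) PySem.Dict.empty
      = PySem.Dict.counter (A.map (fun a => PySem.Int.mod a m)) := by
    have h := PySem.Dict.foldl_insert_getD_add_one_eq_counter (A.map (fun a => PySem.Int.mod a m))
    rw [List.foldl_map] at h
    exact h
  rw [hres]
  dsimp only
  rw [PySem.Dict.items_counter]
  rw [pv_pairs_fold _ (fun r b => if add = true then PySem.Int.mod (r + b) m else PySem.Int.mod (r - b) m)]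
  rw [PySem.Dict.getD_empty, List.map_map]
  simp only [Function.comp_def]
  rw [pv_group_sum (A.map (fun a => PySem.Int.mod a m))
    (fun k => (((B.filter (fun b => decide (0 ≤ b ∧ b < m))).map
      (fun b => if add then PySem.Int.mod (k + b) m else PySem.Int.mod (k - b) m)).count v : Int))]
  rw [List.map_map, zero_add]
  apply congrArg
  apply List.map_congr_left
  intro a _
  simp only [Function.comp_apply]
  have hmap : (B.filter (fun b => decide (0 ≤ b ∧ b < m))).map
        (fun b => if add = true then PySem.Int.mod (PySem.Int.mod a m + b) m
                  else PySem.Int.mod (PySem.Int.mod a m - b) m)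
      = (B.filter (fun b => decide (0 ≤ b ∧ b < m))).map
        (fun b => if add = true then PySem.Int.mod (a + b) m else PySem.Int.mod (a - b) m) := by
    apply List.map_congr_left
    intro b _
    cases add
    · simp only [Bool.false_eq_true, if_false]
      exact pv_mod_collapse_sub a b m hm
    · simp only [if_true]
      exact pv_mod_collapse_add a b m hm
  rw [hmap]

-- A's scan as a 0/1 sum over the same list
theorem pv_scan_sum (A : List Int) (p : Int → Bool) :
    A.foldl (fun acc a => if p a then acc + 1 else acc) (0 : Int)
      = (A.map (fun a => if p a then (1 : Int) else 0)).sum := by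
  rw [PySem.List.foldl_if_add_one]
  rw [PySem.List.sum_map_ite_one_zero]
  simp

-- per-shift agreement for the Delta-style correlations
theorem pv_delta_eq (A B : List Int) (hB : B.Nodup) (m d : Int)
    (hm : 0 < m) (hd0 : 0 ≤ d) (hdm : d < m) :
    (bCorr A B m false).getD d 0 = pyDelta A B d m := by
  rw [pv_bCorr_getD _ _ _ hm]
  unfold pyDelta
  simp only
  rw [pv_scan_sum]
  congr 1
  apply List.map_congr_left
  intro a _
  have hmod0 : 0 ≤ PySem.Int.mod (a - d) m := PySem.Int.mod_nonneg _ hm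
  have hmodm : PySem.Int.mod (a - d) m < m := PySem.Int.mod_lt _ hm
  have := pv_count_indicator B hB m d
      (fun b => if false = true then PySem.Int.mod (a + b) m else PySem.Int.mod (a - b) m)
      (PySem.Int.mod (a - d) m) hmod0 hmodm
      (fun b hb0 hbm => by
        simp only [Bool.false_eq_true, if_false]
        exact pv_mod_sub_iff a b m d hm hd0 hdm hb0 hbm)
  simp only [Bool.false_eq_true, if_false] at this ⊢
  rw [this]
  have hcont : (PySem.Set.ofList B).contains (PySem.Int.mod (a - d) m)
      = decide (PySem.Int.mod (a - d) m ∈ B) := by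
    rw [PySem.Set.contains_eq_decide]
    simp [PySem.Set.mem_ofList]
  rw [hcont]
  by_cases hmem : PySem.Int.mod (a - d) m ∈ B <;> simp [hmem]

-- per-shift agreement for the Sigma-style correlation
theorem pv_sigma_eq (A B : List Int) (hB : B.Nodup) (m d : Int)
    (hm : 0 < m) (hd0 : 0 ≤ d) (hdm : d < m) :
    (bCorr A B m true).getD d 0 = pySigma A B d m := by
  rw [pv_bCorr_getD _ _ _ hm]
  unfold pySigma
  simp only
  rw [pv_scan_sum]
  congr 1
  apply List.map_congr_left
  intro a _
  have hmod0 : 0 ≤ PySem.Int.mod (d - a) m := PySem.Int.mod_nonneg _ hm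
  have hmodm : PySem.Int.mod (d - a) m < m := PySem.Int.mod_lt _ hm
  have := pv_count_indicator B hB m d
      (fun b => if true = true then PySem.Int.mod (a + b) m else PySem.Int.mod (a - b) m)
      (PySem.Int.mod (d - a) m) hmod0 hmodm
      (fun b hb0 hbm => by
        simp only [if_true]
        exact pv_mod_add_iff a b m d hm hd0 hdm hb0 hbm)
  simp only [if_true] at this ⊢
  rw [this]
  have hcont : (PySem.Set.ofList B).contains (PySem.Int.mod (d - a) m)
      = decide (PySem.Int.mod (d - a) m ∈ B) := by
    rw [PySem.Set.contains_eq_decide]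
    simp [PySem.Set.mem_ofList]
  rw [hcont]
  by_cases hmem : PySem.Int.mod (d - a) m ∈ B <;> simp [hmem]

-- A's loop body equals B's judge-based body once the counts agree
theorem pv_body_eq (acc : List (String × Int × Int × Int)) (redTag blueTag : String)
    (d : Int) (c1 c2 : PySem.Dict Int Int) (members : PySem.Set Int) (s t m n cr : Int)
    (hcr : c1.getD d 0 + c2.getD d 0 = cr) :
    (if PySem.Set.contains members d then
      (if cr > n - 2 then acc ++ [(redTag, d, cr, n - 2)] else acc)
     else
      (if (2 * m - 2) - s - t + cr > n - 1 then
        acc ++ [(blueTag, d, (2 * m - 2) - s - t + cr, n - 1)]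
      else acc))
    = (match bJudge redTag blueTag d c1 c2 members (s + t) m n with
       | some v => acc ++ [v]
       | none => acc) := by
  unfold bJudge
  rw [hcr]
  have h : (2 * m - 2) - (s + t) + cr = (2 * m - 2) - s - t + cr := by ring
  cases PySem.Set.contains members d
  · simp only [Bool.false_eq_true, if_false, h]
    split_ifs <;> rfl
  · simp only [if_true]
    split_ifs <;> rfl

-- three chained loops over the same ranges with pointwise-equal bodies
theorem pv_foldl3_congr {α β : Type} (l1 l2 l3 : List β)
    (f1 g1 f2 g2 f3 g3 : List α → β → List α)
    (h1 : ∀ acc x, x ∈ l1 → f1 acc x = g1 acc x)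
    (h2 : ∀ acc x, x ∈ l2 → f2 acc x = g2 acc x)
    (h3 : ∀ acc x, x ∈ l3 → f3 acc x = g3 acc x) :
    l3.foldl f3 (l2.foldl f2 (l1.foldl f1 [])) = l3.foldl g3 (l2.foldl g2 (l1.foldl g1 [])) := by
  have e1 : l1.foldl f1 [] = l1.foldl g1 [] := PySem.List.foldl_congr_mem l1 f1 g1 [] h1
  rw [e1]
  have e2 : l2.foldl f2 (l1.foldl g1 []) = l2.foldl g2 (l1.foldl g1 []) :=
    PySem.List.foldl_congr_mem l2 f2 g2 (l1.foldl g1 []) h2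
  rw [e2]
  exact PySem.List.foldl_congr_mem l3 f3 g3 (l2.foldl g2 (l1.foldl g1 [])) h3

-- ===== VERDICT (by name: the statement is the Claim_ definition above) =====
theorem full_validation_spec : Claim_equal_full_validation := by
  intro D11 D12 D22 m n _ _
  unfold Spec_full_validation
  simp only [full_validation, full_validation_alt]
  have h11 : (PySem.Set.ofList D11 : List Int).Nodup := PySem.Set.nodup_ofList D11
  have h12 : (PySem.Set.ofList D12 : List Int).Nodup := PySem.Set.nodup_ofList D12
  have h22 : (PySem.Set.ofList D22 : List Int).Nodup := PySem.Set.nodup_ofList D22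
  have hT : (PySem.Set.ofList (D12.map (fun x => PySem.Int.mod (-x) m)) : List Int).Nodup :=
    PySem.Set.nodup_ofList _
  apply pv_foldl3_congr
  · intro acc d hd
    have hbd := (PySem.List.mem_pyRange_one).mp hd
    have hm : 0 < m := by omega
    exact pv_body_eq acc _ _ d _ _ _ _ _ _ _ _
      (by rw [pv_delta_eq _ _ h11 m d hm (by omega) (by omega),
        pv_delta_eq _ _ h12 m d hm (by omega) (by omega)])
  · intro acc d hd
    have hbd := (PySem.List.mem_pyRange_one).mp hd
    have hm : 0 < m := by omega
    exact pv_body_eq acc _ _ d _ _ _ _ _ _ _ _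
      (by rw [pv_delta_eq _ _ h22 m d hm (by omega) (by omega),
        pv_delta_eq _ _ hT m d hm (by omega) (by omega)])
  · intro acc d hd
    have hbd := (PySem.List.mem_pyRange_one).mp hd
    have hm : 0 < m := by omega
    exact pv_body_eq acc _ _ d _ _ _ _ _ _ _ _
      (by rw [pv_sigma_eq _ _ h12 m d hm (by omega) (by omega),
        pv_delta_eq _ _ h22 m d hm (by omega) (by omega)])
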